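-- pv_equiv track=rewrite | github.com/jhowtkd/marketing-skills | 09-tools/scripts/ops_checkpoint_v21_week1.py | recommend_actions
-- ===== SOURCE A (Python) =====
-- from typing import Any
--
-- def recommend_actions(
--     regressions: list[dict[str, Any]],
--     causes: list[str]
-- ) -> list[dict[str, Any]]:
--     """Gera ações recomendadas com prioridade."""
--     actions = []
--
--     # P0 - Ações críticas
--     if any(r["kpi"] == "Incident Rate" for r in regressions):
--         actions.append({
--             "priority": "P0",
--             "action": "Revisar logs de incidentes e considerar rollback de políticas adaptativas",
--             "owner": "SRE/Platform",
--             "eta": "24h",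
--         })
--
--     if any(r["kpi"] == "Approval Timeout Rate" and r["severity"] in ("CRITICAL", "HIGH")
--            for r in regressions):
--         actions.append({
--             "priority": "P0",
--             "action": "Aumentar capacidade de processamento de aprovações ou ajustar timeouts",
--             "owner": "Platform",
--             "eta": "48h",
--         })
--
--     # P1 - Ações importantes
--     if any(r["kpi"] == "Mean Decision Latency (Medium/High)" for r in regressions):
--         actions.append({
--             "priority": "P1",
--             "action": "Otimizar prompts de decisão média/alta complexidade ou implementar caching",
--             "owner": "ML/Platform",
--             "eta": "1 semana",
--         })
--
--     if any(r["kpi"] == "Approval Without Regeneration (24h)" for r in regressions):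
--         actions.append({
--             "priority": "P1",
--             "action": "Revisar thresholds de aprovação automática e qualidade de saída",
--             "owner": "Product/ML",
--             "eta": "1 semana",
--         })
--
--     # P2 - Melhorias contínuas
--     actions.append({
--         "priority": "P2",
--         "action": "Documentar padrões de escalonamento mais efetivos",
--         "owner": "Documentation",
--         "eta": "2 semanas",
--     })
--
--     actions.append({
--         "priority": "P2",
--         "action": "Implementar alerting antecipado para timeout rate",
--         "owner": "SRE",
--         "eta": "2 semanas",
--     })
--
--     return actions
-- ===== SOURCE B (Python) =====
-- from typing import Any
--
-- def recommend_actions(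
--     regressions: list[dict[str, Any]],
--     causes: list[str]
-- ) -> list[dict[str, Any]]:
--     """Gera ações recomendadas com prioridade (table-driven, single pass over regressions)."""
--     kpis = set()
--     timeout_hot = False
--     for r in regressions:
--         k = r["kpi"]
--         kpis.add(k)
--         if k == "Approval Timeout Rate" and r["severity"] in ("CRITICAL", "HIGH"):
--             timeout_hot = True
--     rules = [
--         ("Incident Rate" in kpis, {
--             "priority": "P0",
--             "action": "Revisar logs de incidentes e considerar rollback de políticas adaptativas",
--             "owner": "SRE/Platform",
--             "eta": "24h",
--         }),
--         (timeout_hot, {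
--             "priority": "P0",
--             "action": "Aumentar capacidade de processamento de aprovações ou ajustar timeouts",
--             "owner": "Platform",
--             "eta": "48h",
--         }),
--         ("Mean Decision Latency (Medium/High)" in kpis, {
--             "priority": "P1",
--             "action": "Otimizar prompts de decisão média/alta complexidade ou implementar caching",
--             "owner": "ML/Platform",
--             "eta": "1 semana",
--         }),
--         ("Approval Without Regeneration (24h)" in kpis, {
--             "priority": "P1",
--             "action": "Revisar thresholds de aprovação automática e qualidade de saída",
--             "owner": "Product/ML",
--             "eta": "1 semana",
--         }),
--         (True, {
--             "priority": "P2",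
--             "action": "Documentar padrões de escalonamento mais efetivos",
--             "owner": "Documentation",
--             "eta": "2 semanas",
--         }),
--         (True, {
--             "priority": "P2",
--             "action": "Implementar alerting antecipado para timeout rate",
--             "owner": "SRE",
--             "eta": "2 semanas",
--         }),
--     ]
--     return [act for cond, act in rules if cond]
-- ===== Notes on version B (the rewrite author's own statement) =====
-- stated objective: alternative
-- what changed: Replaces A's four separate any()-scans over regressions by a single pass that collects the set of KPIs and a timeout-severity flag, then emits the actions from an ordered (condition, action) rules table via one comprehension.
import Mathlib
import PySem

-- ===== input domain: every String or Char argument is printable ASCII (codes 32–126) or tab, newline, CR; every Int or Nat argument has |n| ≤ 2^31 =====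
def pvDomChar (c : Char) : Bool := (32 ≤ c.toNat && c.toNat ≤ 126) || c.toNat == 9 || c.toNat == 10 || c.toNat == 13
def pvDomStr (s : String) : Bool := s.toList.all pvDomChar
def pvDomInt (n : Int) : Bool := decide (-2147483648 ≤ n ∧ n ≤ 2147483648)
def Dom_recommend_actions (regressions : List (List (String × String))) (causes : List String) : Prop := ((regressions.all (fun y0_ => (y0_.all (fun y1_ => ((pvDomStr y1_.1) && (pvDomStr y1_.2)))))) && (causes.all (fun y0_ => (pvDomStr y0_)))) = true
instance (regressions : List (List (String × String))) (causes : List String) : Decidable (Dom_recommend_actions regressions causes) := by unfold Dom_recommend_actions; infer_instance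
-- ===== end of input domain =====

-- B replaces A's four any()-scans by one pass (KPI set + severity flag) and a table-driven
-- emission; same return value on Pre_ (objective: alternative decomposition, not faster).


-- r[k] for the Python dicts (assoc lists, first match); none = KeyError, excluded by Pre_
def pvLookup (r : List (String × String)) (k : String) : Option String :=
  (r.find? (fun p => p.1 == k)).map (·.2)

-- total form used inside the ports; Pre_ guarantees the key is present wherever it is read
def pvGetD (r : List (String × String)) (k : String) : String := (pvLookup r k).getD ""

-- the six verbatim action dicts (shared literal data of both programs)
def actP0a : List (String × String) := [("priority","P0"),("action","Revisar logs de incidentes e considerar rollback de políticas adaptativas"),("owner","SRE/Platform"),("eta","24h")]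
def actP0b : List (String × String) := [("priority","P0"),("action","Aumentar capacidade de processamento de aprovações ou ajustar timeouts"),("owner","Platform"),("eta","48h")]
def actP1a : List (String × String) := [("priority","P1"),("action","Otimizar prompts de decisão média/alta complexidade ou implementar caching"),("owner","ML/Platform"),("eta","1 semana")]
def actP1b : List (String × String) := [("priority","P1"),("action","Revisar thresholds de aprovação automática e qualidade de saída"),("owner","Product/ML"),("eta","1 semana")]
def actP2a : List (String × String) := [("priority","P2"),("action","Documentar padrões de escalonamento mais efetivos"),("owner","Documentation"),("eta","2 semanas")]
def actP2b : List (String × String) := [("priority","P2"),("action","Implementar alerting antecipado para timeout rate"),("owner","SRE"),("eta","2 semanas")]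

-- ===== PORT A =====
def recommend_actions (regressions : List (List (String × String))) (causes : List String) : List (List (String × String)) :=
  let actions : List (List (String × String)) := []
  let actions := if regressions.any (fun r => pvGetD r "kpi" == "Incident Rate")
                 then actions ++ [actP0a] else actions
  let actions := if regressions.any (fun r => pvGetD r "kpi" == "Approval Timeout Rate" &&
                      (pvGetD r "severity" == "CRITICAL" || pvGetD r "severity" == "HIGH"))
                 then actions ++ [actP0b] else actions
  let actions := if regressions.any (fun r => pvGetD r "kpi" == "Mean Decision Latency (Medium/High)")
                 then actions ++ [actP1a] else actions
  let actions := if regressions.any (fun r => pvGetD r "kpi" == "Approval Without Regeneration (24h)")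
                 then actions ++ [actP1b] else actions
  let actions := actions ++ [actP2a]
  let actions := actions ++ [actP2b]
  actions

-- ===== PORT B =====
def recommend_actions_alt (regressions : List (List (String × String))) (causes : List String) : List (List (String × String)) :=
  let st := regressions.foldl (fun (st : PySem.Set String × Bool) r =>
      let k := pvGetD r "kpi"
      (PySem.Set.add st.1 k,
       st.2 || (k == "Approval Timeout Rate" &&
                (pvGetD r "severity" == "CRITICAL" || pvGetD r "severity" == "HIGH"))))
    (PySem.Set.empty, false)
  let rules : List (Bool × List (String × String)) :=
    [(PySem.Set.contains st.1 "Incident Rate", actP0a),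
     (st.2, actP0b),
     (PySem.Set.contains st.1 "Mean Decision Latency (Medium/High)", actP1a),
     (PySem.Set.contains st.1 "Approval Without Regeneration (24h)", actP1b),
     (true, actP2a),
     (true, actP2b)]
  (rules.filter (·.1)).map (·.2)

-- ===== PRECONDITION & SPEC =====
-- Pre_ excludes regressions dicts missing the "kpi" key, or an "Approval Timeout Rate" dict missing
-- "severity": on such inputs Python A raises KeyError except when an earlier any() match happens to
-- short-circuit past the missing key, an accident of A's scan order which B's single pass does not share.
def Pre_recommend_actions (regressions : List (List (String × String))) (causes : List String) : Prop :=
  regressions.all (fun r => (pvLookup r "kpi").isSome &&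
    (!(pvGetD r "kpi" == "Approval Timeout Rate") || (pvLookup r "severity").isSome)) = true
instance (regressions : List (List (String × String))) (causes : List String) : Decidable (Pre_recommend_actions regressions causes) := by unfold Pre_recommend_actions; infer_instance

def pvWitness_recommend_actions : (List (List (String × String))) × List String :=
  ([[("kpi","Incident Rate"),("severity","LOW")],
    [("kpi","Approval Timeout Rate"),("severity","HIGH")]], ["spike"])

def Spec_recommend_actions (regressions : List (List (String × String))) (causes : List String) (out : List (List (String × String))) : Prop := out = recommend_actions_alt regressions causes
instance (regressions : List (List (String × String))) (causes : List String) (out : List (List (String × String))) : Decidable (Spec_recommend_actions regressions causes out) := by unfold Spec_recommend_actions; infer_instance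

-- ===== CLAIM (what is proved, stated in full; the proofs are below) =====
def Claim_equal_recommend_actions : Prop := ∀ (regressions : List (List (String × String))) (causes : List String), Dom_recommend_actions regressions causes → Pre_recommend_actions regressions causes → Spec_recommend_actions regressions causes (recommend_actions regressions causes)

-- ===== LEMMAS AND PROOFS =====

-- B's single fold over the pair state splits into the set-building fold and an any-scan
theorem foldPair (regs : List (List (String × String))) (p : List (String × String) → Bool)
    (s : PySem.Set String) (b : Bool) :
    regs.foldl (fun (st : PySem.Set String × Bool) r =>
        (PySem.Set.add st.1 (pvGetD r "kpi"), st.2 || p r)) (s, b)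
    = (regs.foldl (fun s r => PySem.Set.add s (pvGetD r "kpi")) s, b || regs.any p) := by
  induction regs generalizing s b with
  | nil => simp
  | cons r rest ih => simp [List.foldl_cons, ih, Bool.or_assoc]

theorem contains_add (s : PySem.Set String) (x k : String) :
    (PySem.Set.add s x).contains k = (s.contains k || x == k) := by
  simp only [PySem.Set.add, PySem.Set.contains]
  by_cases h : List.contains s x = true
  · rw [if_pos h]
    by_cases hk : x = k <;> simp_all
  · rw [if_neg h]
    by_cases hk : k = x
    · subst hk; simp
    · simp [hk, Ne.symm hk]

-- membership in the KPI set built by the fold is exactly A's any-scan for that KPI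
theorem containsFold (regs : List (List (String × String))) (s : PySem.Set String) (k : String) :
    (regs.foldl (fun s r => PySem.Set.add s (pvGetD r "kpi")) s).contains k
    = (s.contains k || regs.any (fun r => pvGetD r "kpi" == k)) := by
  induction regs generalizing s with
  | nil => simp
  | cons r rest ih =>
    simp only [List.foldl_cons, List.any_cons]
    rw [ih, contains_add, Bool.or_assoc]

-- ===== VERDICT (by name: the statement is the Claim_ definition above) =====
theorem recommend_actions_spec : Claim_equal_recommend_actions := by
  intro regs causes _ _
  unfold Spec_recommend_actions recommend_actions recommend_actions_alt
  simp only [foldPair, containsFold]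
  simp only [PySem.Set.empty, PySem.Set.contains, List.elem_nil, Bool.false_or]
  generalize regs.any (fun r => pvGetD r "kpi" == "Incident Rate") = c0
  generalize regs.any (fun r => pvGetD r "kpi" == "Approval Timeout Rate" &&
      (pvGetD r "severity" == "CRITICAL" || pvGetD r "severity" == "HIGH")) = c1
  generalize regs.any (fun r => pvGetD r "kpi" == "Mean Decision Latency (Medium/High)") = c2
  generalize regs.any (fun r => pvGetD r "kpi" == "Approval Without Regeneration (24h)") = c3
  cases c0 <;> cases c1 <;> cases c2 <;> cases c3 <;> rfl
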